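-- pv_equiv track=rewrite | github.com/kiselevskaya/Python | experiments/34_question_and_solutions/05_bit_manipulation/same_one_bits.py | non_trailing_zero
-- ===== SOURCE A (Python) =====
-- def non_trailing_zero(n):
--     n = bin(n)[2:]
--     count = 0       # count for 1 before first non-trailing 0
--     one = False
--     for i in range(len(n)-1, -1, -1):
--         if n[i] == '1':
--             count += 1
--             if not one:
--                 one = True
--         if one and n[i] == '0':
--             return i, count
--     return None, count
-- ===== SOURCE B (Python) =====
-- def non_trailing_zero(n):
--     s = bin(n)[2:]
--     r = s[::-1]
--     i1 = r.find('1')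
--     if i1 == -1:
--         return None, 0
--     i0 = r.find('0', i1)
--     if i0 == -1:
--         return None, r.count('1', i1)
--     return len(s) - 1 - i0, i0 - i1
-- ===== Notes on version B (the rewrite author's own statement) =====
-- stated objective: alternative
-- what changed: Replaces A's stateful LSB-upward indexed loop (count/one flags, early return) with index arithmetic on the reversed string: find the first '1', find the first '0' after it, and derive position and run length from those two indices.
import Mathlib
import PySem

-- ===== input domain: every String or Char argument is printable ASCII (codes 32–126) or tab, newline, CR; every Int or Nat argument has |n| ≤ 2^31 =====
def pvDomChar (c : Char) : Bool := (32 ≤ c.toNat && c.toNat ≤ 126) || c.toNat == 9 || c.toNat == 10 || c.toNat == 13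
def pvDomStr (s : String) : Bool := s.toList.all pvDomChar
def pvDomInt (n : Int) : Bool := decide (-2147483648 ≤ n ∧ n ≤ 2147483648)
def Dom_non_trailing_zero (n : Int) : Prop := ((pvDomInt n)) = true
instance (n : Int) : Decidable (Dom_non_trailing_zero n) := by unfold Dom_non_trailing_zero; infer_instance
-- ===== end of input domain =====

-- B replaces A's stateful LSB-upward indexed loop by find/count index arithmetic on the
-- reversed bit string (objective: alternative decomposition, same cost).

-- ===== PORT A =====

-- bin(n)[2:] as a char list (PySem.Int.toBinChars0b is bin(n); [2:] with literal start 2 ≥ 0 is drop 2)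
def pvBinStr (n : Int) : List Char := (PySem.Int.toBinChars0b n).drop 2

-- the 'for i in range(len(n)-1, -1, -1)' loop of A; fuel = i+1, reads s[i] each step (always in range)
def pvLoopA (s : List Char) : Int → Bool → Nat → Option Int × Int
  | count, _, 0 => (none, count)
  | count, one, i + 1 =>
    let c := s.getD i ' '
    let count' := if c = '1' then count + 1 else count
    let one' := if c = '1' then true else one
    if one' ∧ c = '0' then (some (i : Int), count')
    else pvLoopA s count' one' i

def non_trailing_zero (n : Int) : Option Int × Int :=
  let s := pvBinStr n
  pvLoopA s 0 false s.length

-- ===== PORT B =====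

def non_trailing_zero_alt (n : Int) : Option Int × Int :=
  let s := pvBinStr n
  let r := s.reverse
  match r.findIdx? (· = '1') with     -- r.find('1'); none = -1
  | none => (none, 0)
  | some i1 =>
    match (r.drop i1).findIdx? (· = '0') with   -- r.find('0', i1) = i1 + offset in r[i1:]
    | none => (none, ((r.drop i1).count '1' : Int))  -- r.count('1', i1)
    | some j => (some ((s.length : Int) - 1 - (i1 + (j : Int))), (j : Int))

-- ===== PRECONDITION & SPEC =====
def Spec_non_trailing_zero (n : Int) (out : Option Int × Int) : Prop := out = non_trailing_zero_alt n
instance (n : Int) (out : Option Int × Int) : Decidable (Spec_non_trailing_zero n out) := by unfold Spec_non_trailing_zero; infer_instance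

-- ===== CLAIM (what is proved, stated in full; the proofs are below) =====
def Claim_equal_non_trailing_zero : Prop := ∀ (n : Int), Dom_non_trailing_zero n → Spec_non_trailing_zero n (non_trailing_zero n)

-- ===== LEMMAS AND PROOFS =====

-- forward scan over the reversed string, carrying the current s-index i
def pvScanR : List Char → Int → Bool → Int → Option Int × Int
  | [], count, _, _ => (none, count)
  | c :: t, count, one, i =>
    let count' := if c = '1' then count + 1 else count
    let one' := if c = '1' then true else one
    if one' ∧ c = '0' then (some i, count')
    else pvScanR t count' one' (i - 1)

theorem pvScanR_cons_zero_true (t : List Char) (count i : Int) :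
    pvScanR ('0' :: t) count true i = (some i, count) := by simp [pvScanR]

theorem pvScanR_cons_zero_false (t : List Char) (count i : Int) :
    pvScanR ('0' :: t) count false i = pvScanR t count false (i - 1) := by simp [pvScanR]

theorem pvScanR_cons_one (t : List Char) (count : Int) (one : Bool) (i : Int) :
    pvScanR ('1' :: t) count one i = pvScanR t (count + 1) true (i - 1) := by simp [pvScanR]

theorem pvLoopA_eq_scanR (s : List Char) :
    ∀ (f : Nat), f ≤ s.length → ∀ (count : Int) (one : Bool),
    pvLoopA s count one f = pvScanR ((s.take f).reverse) count one ((f : Int) - 1) := by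
  intro f
  induction f with
  | zero => intro _ count one; simp [pvLoopA, pvScanR]
  | succ i ih =>
    intro hf count one
    have hi : i < s.length := by omega
    have htake : (s.take (i + 1)).reverse = s[i] :: (s.take i).reverse := by
      rw [List.take_add_one]
      simp [List.getElem?_eq_getElem hi]
    have hget : s.getD i ' ' = s[i] := by
      simp [List.getD, List.getElem?_eq_getElem hi]
    have hidx : ((i + 1 : Nat) : Int) - 1 - 1 = (i : Int) - 1 := by push_cast; ring
    rw [htake]
    simp only [pvLoopA, pvScanR, hget]
    split_ifs
    all_goals try (rw [hidx, ih (by omega)])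
    all_goals simp only [Prod.mk.injEq, Option.some.injEq, and_true]
    all_goals push_cast
    all_goals omega

-- the characterisation of the scan, proved for lists of '0'/'1' digits with an
-- optional trailing 'b' (the shape bin(n)[2:] reversed always has)
theorem pvScanR_phase2 (e : List Char) (he : e = [] ∨ e = ['b']) :
    ∀ (t : List Char), (∀ c ∈ t, c = '0' ∨ c = '1') →
    ∀ (count i : Int),
    pvScanR (t ++ e) count true i =
      match (t ++ e).findIdx? (· = '0') with
      | none => (none, count + ((t ++ e).count '1' : Int))
      | some j => (some (i - (j : Int)), count + (j : Int)) := by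
  intro t
  induction t with
  | nil =>
    intro _ count i
    rcases he with rfl | rfl <;>
      simp [pvScanR, List.findIdx?_cons, List.findIdx?_nil]
  | cons c t ih =>
    intro hbin count i
    have hrec := ih (fun c hc => hbin c (by simp [hc])) (count + 1) (i - 1)
    rcases hbin c (by simp) with rfl | rfl
    · -- c = '0' : immediate return
      rw [List.cons_append, pvScanR_cons_zero_true, List.findIdx?_cons,
          if_pos (by decide)]
      norm_num
    · -- c = '1' : count it and continue
      rw [List.cons_append, pvScanR_cons_one, hrec, List.findIdx?_cons,
          if_neg (by decide)]
      cases hfj : (t ++ e).findIdx? (· = '0') with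
      | none =>
        simp only [Option.map_none, List.count_cons_self, Prod.mk.injEq, true_and]
        push_cast; ring
      | some j =>
        simp only [Option.map_some, Prod.mk.injEq, Option.some.injEq]
        constructor <;> push_cast <;> ring

theorem pvScanR_phase1 (e : List Char) (he : e = [] ∨ e = ['b']) :
    ∀ (t : List Char), (∀ c ∈ t, c = '0' ∨ c = '1') →
    ∀ (i : Int),
    pvScanR (t ++ e) 0 false i =
      match (t ++ e).findIdx? (· = '1') with
      | none => (none, 0)
      | some i1 =>
        match ((t ++ e).drop i1).findIdx? (· = '0') with
        | none => (none, (((t ++ e).drop i1).count '1' : Int))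
        | some j => (some (i - (i1 : Int) - (j : Int)), (j : Int)) := by
  intro t
  induction t with
  | nil =>
    intro _ i
    rcases he with rfl | rfl <;>
      simp [pvScanR, List.findIdx?_cons, List.findIdx?_nil]
  | cons c t ih =>
    intro hbin i
    rcases hbin c (by simp) with rfl | rfl
    · -- c = '0' : still scanning for the first '1'
      have hrec := ih (fun c hc => hbin c (by simp [hc])) (i - 1)
      rw [List.cons_append, pvScanR_cons_zero_false, hrec, List.findIdx?_cons,
          if_neg (by decide)]
      cases hfi : (t ++ e).findIdx? (· = '1') with
      | none => rfl
      | some i1 =>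
        simp only [Option.map_some, List.drop_succ_cons]
        cases hfj : ((t ++ e).drop i1).findIdx? (· = '0') with
        | none => rfl
        | some j =>
          simp only [Prod.mk.injEq, Option.some.injEq, and_true]
          push_cast; ring
    · -- c = '1' : found the first one; hand over to phase 2 on the tail
      have h2 := pvScanR_phase2 e he t (fun c hc => hbin c (by simp [hc])) 1 (i - 1)
      rw [List.cons_append, pvScanR_cons_one, show (0:Int) + 1 = 1 by norm_num,
          h2, List.findIdx?_cons, if_pos (by decide)]
      simp only [List.drop_zero]
      rw [List.findIdx?_cons, if_neg (by decide)]
      cases hfj : (t ++ e).findIdx? (· = '0') with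
      | none =>
        simp only [Option.map_none, List.count_cons_self, Prod.mk.injEq, true_and]
        push_cast; ring
      | some j =>
        simp only [Option.map_some, Prod.mk.injEq, Option.some.injEq]
        constructor <;> push_cast <;> ring

theorem pvBin_digits (m : Nat) : ∀ c ∈ Nat.toDigits 2 m, c = '0' ∨ c = '1' := by
  have key : ∀ (f : Nat) (n : Nat) (l : List Char), (∀ c ∈ l, c = '0' ∨ c = '1') →
      ∀ c ∈ Nat.toDigitsCore 2 f n l, c = '0' ∨ c = '1' := by
    intro f
    induction f with
    | zero => intro n l hl; simpa [Nat.toDigitsCore] using hl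
    | succ f ih =>
      intro n l hl c hc
      simp only [Nat.toDigitsCore] at hc
      have hd : Nat.digitChar (n % 2) = '0' ∨ Nat.digitChar (n % 2) = '1' := by
        have h2 : n % 2 = 0 ∨ n % 2 = 1 := by omega
        rcases h2 with h | h <;> rw [h] <;> [left; right] <;> rfl
      split at hc
      · rcases List.mem_cons.mp hc with rfl | hc
        · exact hd
        · exact hl c hc
      · refine ih (n / 2) _ ?_ c hc
        intro c' hc'
        rcases List.mem_cons.mp hc' with rfl | hc'
        · exact hd
        · exact hl c' hc'
  intro c hc
  exact key _ _ [] (by simp) c hc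

-- bin(n)[2:] reversed is (binary digits reversed) ++ ([] or ['b'])
theorem pvBinStr_shape (n : Int) :
    ∃ t e, (∀ c ∈ t, c = '0' ∨ c = '1') ∧ (e = [] ∨ e = ['b']) ∧
      (pvBinStr n).reverse = t ++ e := by
  unfold pvBinStr PySem.Int.toBinChars0b
  split
  · exact ⟨(Nat.toDigits 2 n.natAbs).reverse, ['b'],
      fun c hc => pvBin_digits _ c (List.mem_reverse.mp hc), Or.inr rfl, by simp⟩
  · exact ⟨(Nat.toDigits 2 n.toNat).reverse, [],
      fun c hc => pvBin_digits _ c (List.mem_reverse.mp hc), Or.inl rfl, by simp⟩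

-- ===== VERDICT (by name: the statement is the Claim_ definition above) =====
theorem non_trailing_zero_spec : Claim_equal_non_trailing_zero := by
  intro n _
  obtain ⟨t, e, hbin, he, hshape⟩ := pvBinStr_shape n
  show pvLoopA (pvBinStr n) 0 false (pvBinStr n).length =
    (match ((pvBinStr n).reverse).findIdx? (· = '1') with
     | none => (none, 0)
     | some i1 =>
       match (((pvBinStr n).reverse).drop i1).findIdx? (· = '0') with
       | none => (none, ((((pvBinStr n).reverse).drop i1).count '1' : Int))
       | some j => (some (((pvBinStr n).length : Int) - 1 - ((i1 : Int) + (j : Int))), (j : Int)))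
  rw [pvLoopA_eq_scanR _ _ le_rfl, List.take_length, hshape,
      pvScanR_phase1 e he t hbin]
  cases hf1 : (t ++ e).findIdx? (· = '1') with
  | none => rfl
  | some i1 =>
    cases hf0 : ((t ++ e).drop i1).findIdx? (· = '0') with
    | none => simp only [hf0]
    | some j =>
      simp only [hf0, Prod.mk.injEq, Option.some.injEq, and_true]
      ring
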